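-- pv_equiv track=rewrite | github.com/kantonist/n-boards-k-painters | body.py | partitionTime
-- ===== SOURCE A (Python) =====
-- def partitionTime(partition, array):
--     k = len(partition)
--     time = list([0]*k)
--     for i in range (0,k):
--         start = sum(partition[0:i])
--         end = sum(partition[0:i+1])
--         time[i] = sum(array[start:end])
--     return max(time)
-- ===== SOURCE B (Python) =====
-- def partitionTime(partition, array):
--     best = None
--     start = 0
--     for p in partition:
--         end = start + p
--         s = sum(array[start:end])
--         if best is None or s > best:
--             best = s
--         start = end
--     return best
-- ===== Notes on version B (the rewrite author's own statement) =====
-- stated objective: faster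
-- what changed: B keeps a running segment start and a running maximum in one pass over the partition lengths, instead of A's recomputing sum(partition[0:i]) from scratch for every i, building a time list, and taking max at the end; Pre_ excludes only partition = [], where A raises ValueError (max of an empty list).
-- outside the precondition, e.g. on partitionTime([], [1, 2]): A raises ValueError, B returns None
import Mathlib
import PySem

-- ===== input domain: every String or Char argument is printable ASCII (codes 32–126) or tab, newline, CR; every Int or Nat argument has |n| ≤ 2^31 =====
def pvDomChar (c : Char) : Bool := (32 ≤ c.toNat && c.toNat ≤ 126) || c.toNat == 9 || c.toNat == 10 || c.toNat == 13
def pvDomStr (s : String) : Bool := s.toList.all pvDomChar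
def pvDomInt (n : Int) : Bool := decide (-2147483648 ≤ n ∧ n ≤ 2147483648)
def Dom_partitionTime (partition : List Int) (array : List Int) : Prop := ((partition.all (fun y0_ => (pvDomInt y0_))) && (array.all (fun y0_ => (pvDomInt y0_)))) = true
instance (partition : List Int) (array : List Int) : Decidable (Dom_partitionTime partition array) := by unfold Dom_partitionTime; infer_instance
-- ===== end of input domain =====

-- B tracks a running segment start and a running maximum in one pass instead of
-- re-summing partition prefixes and collecting a time list; equivalence is about return values.

-- ===== PORT A =====
def partitionTime (partition : List Int) (array : List Int) : Int :=
  let k : Int := (partition.length : Int)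
  let time0 : List Int := List.replicate partition.length 0
  let time := (PySem.List.pyRange 0 k 1).foldl
    (fun t i =>
      let start := (PySem.List.slice partition (some 0) (some i)).sum
      let stop  := (PySem.List.slice partition (some 0) (some (i + 1))).sum
      t.set i.toNat ((PySem.List.slice array (some start) (some stop)).sum)) time0
  (PySem.List.max? time (fun y => y)).getD 0    -- max([]) raises ValueError: excluded by Pre_

-- ===== PORT B =====
-- Source B's loop body: state (best, start)
def pvStep (array : List Int) (st : Option Int × Int) (p : Int) : Option Int × Int :=
  let e := st.2 + p
  let s := (PySem.List.slice array (some st.2) (some e)).sum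
  let best := match st.1 with
    | none => some s
    | some b => if s > b then some s else some b
  (best, e)

def partitionTime_alt (partition : List Int) (array : List Int) : Int :=
  ((partition.foldl (pvStep array) (none, 0)).1).getD 0    -- Source B returns None for partition = []: excluded by Pre_

-- ===== PRECONDITION & SPEC =====
-- Pre_ excludes only partition = [], where A raises ValueError (max of an empty list).
def Pre_partitionTime (partition : List Int) (array : List Int) : Prop := partition ≠ []
instance (partition : List Int) (array : List Int) : Decidable (Pre_partitionTime partition array) := by unfold Pre_partitionTime; infer_instance
def pvWitness_partitionTime : List Int × List Int := ([1, 2], [3, -4, 5])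

def Spec_partitionTime (partition : List Int) (array : List Int) (out : Int) : Prop := out = partitionTime_alt partition array
instance (partition : List Int) (array : List Int) (out : Int) : Decidable (Spec_partitionTime partition array out) := by unfold Spec_partitionTime; infer_instance

-- ===== CLAIM (what is proved, stated in full; the proofs are below) =====
def Claim_equal_partitionTime : Prop := ∀ (partition : List Int) (array : List Int), Dom_partitionTime partition array → Pre_partitionTime partition array → Spec_partitionTime partition array (partitionTime partition array)

-- ===== LEMMAS AND PROOFS =====

-- the Python value of sum(array[a:b])
def pvSeg (array : List Int) (a b : Int) : Int := (PySem.List.slice array (some a) (some b)).sum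

-- the list of segment sums cut out of `array` by the lengths `xs`, starting at offset s
def pvSegs (array : List Int) : Int → List Int → List Int
  | _, [] => []
  | s, p :: ps => pvSeg array s (s + p) :: pvSegs array (s + p) ps

-- B's loop from a non-empty best accumulator computes a running max over pvSegs
theorem pvB_fold (array : List Int) : ∀ (xs : List Int) (b0 s0 : Int),
    xs.foldl (pvStep array) (some b0, s0)
      = (some ((pvSegs array s0 xs).foldl max b0), s0 + xs.sum) := by
  intro xs
  induction xs with
  | nil => intro b0 s0; simp [pvSegs]
  | cons v t ih =>
    intro b0 s0
    simp only [List.foldl_cons, pvStep]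
    have hif : (if pvSeg array s0 (s0 + v) > b0 then some (pvSeg array s0 (s0 + v)) else some b0)
        = some (max b0 (pvSeg array s0 (s0 + v))) := by
      split_ifs with h
      · rw [max_eq_right (le_of_lt h)]
      · rw [max_eq_left (not_lt.mp h)]
    simp only [pvSeg] at hif
    rw [hif, ih]
    simp [pvSegs, pvSeg, add_assoc]

-- setting indices 0..k-1 of any sufficiently long list yields map f (range k) ++ leftover
theorem pvFold_set (f : Nat → Int) : ∀ (k : Nat) (l : List Int), k ≤ l.length →
    (List.range k).foldl (fun t j => t.set j (f j)) l = (List.range k).map f ++ l.drop k := by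
  intro k
  induction k with
  | zero => intro l _; simp
  | succ k ih =>
    intro l hk
    rw [List.range_succ, List.foldl_append]
    rw [ih l (by omega)]
    simp only [List.foldl_cons, List.foldl_nil]
    have hkl : k < l.length := by omega
    rw [List.drop_eq_getElem_cons hkl]
    have h2 : ((List.range k).map f ++ l[k] :: l.drop (k + 1)).set k (f k)
        = (List.range k).map f ++ (f k :: l.drop (k + 1)) := by
      rw [List.set_append_right _ _ (by simp)]
      simp
      rw [List.drop_eq_getElem_cons hkl]
      rfl
    rw [h2]
    simp

-- the segment list written out by index
theorem pvSegs_eq_map (array : List Int) : ∀ (xs : List Int) (s0 : Int),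
    pvSegs array s0 xs = (List.range xs.length).map
      (fun j => pvSeg array (s0 + (xs.take j).sum) (s0 + (xs.take (j + 1)).sum)) := by
  intro xs
  induction xs with
  | nil => intro s0; simp [pvSegs]
  | cons v t ih =>
    intro s0
    simp only [pvSegs, List.length_cons, List.range_succ_eq_map, List.map_cons, List.map_map]
    refine List.cons_eq_cons.mpr ⟨?_, ?_⟩
    · simp
    · rw [ih (s0 + v)]
      apply List.map_congr_left
      intro j _
      simp [Function.comp, List.take_succ_cons, add_assoc]

-- A's time array equals the segment list
theorem pvA_time (partition array : List Int) :
    (PySem.List.pyRange 0 (partition.length : Int) 1).foldl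
      (fun t i =>
        t.set i.toNat ((PySem.List.slice array
          (some ((PySem.List.slice partition (some 0) (some i)).sum))
          (some ((PySem.List.slice partition (some 0) (some (i + 1))).sum))).sum))
      (List.replicate partition.length 0)
    = pvSegs array 0 partition := by
  rw [PySem.List.pyRange_one, List.foldl_map]
  have hstep : ∀ (t : List Int) (j : Nat),
      t.set ((0 + (j : Int)).toNat) ((PySem.List.slice array
          (some ((PySem.List.slice partition (some 0) (some (0 + (j : Int)))).sum))
          (some ((PySem.List.slice partition (some 0) (some (0 + (j : Int) + 1))).sum))).sum)
      = t.set j (pvSeg array ((partition.take j).sum) ((partition.take (j + 1)).sum)) := by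
    intro t j
    have h0 : (0 : Int) + (j : Int) = ((j : Nat) : Int) := by omega
    have h1 : (0 : Int) + (j : Int) + 1 = (((j + 1) : Nat) : Int) := by push_cast; ring
    rw [h1, h0]
    rw [PySem.List.slice_zero_start, PySem.List.slice_zero_start,
        PySem.List.slice_to_natCast, PySem.List.slice_to_natCast]
    simp [pvSeg]
  have hfun : (fun (t : List Int) (j : Nat) =>
      t.set ((0 + (j : Int)).toNat) ((PySem.List.slice array
          (some ((PySem.List.slice partition (some 0) (some (0 + (j : Int)))).sum))
          (some ((PySem.List.slice partition (some 0) (some (0 + (j : Int) + 1))).sum))).sum))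
      = fun (t : List Int) (j : Nat) => t.set j (pvSeg array ((partition.take j).sum) ((partition.take (j + 1)).sum)) := by
    funext t j; exact hstep t j
  rw [hfun]
  have hlen : ((partition.length : Int) - 0).toNat = partition.length := by simp
  rw [hlen]
  rw [pvFold_set _ partition.length (List.replicate partition.length 0) (by simp)]
  rw [pvSegs_eq_map array partition 0]
  simp

-- ===== VERDICT (by name: the statement is the Claim_ definition above) =====
theorem partitionTime_spec : Claim_equal_partitionTime := by
  intro partition array _ hpre
  unfold Spec_partitionTime partitionTime partitionTime_alt
  cases partition with
  | nil => exact absurd rfl hpre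
  | cons p ps =>
    simp only []
    rw [pvA_time (p :: ps) array]
    simp only [List.foldl_cons, pvStep]
    rw [pvB_fold array ps ((PySem.List.slice array (some 0) (some (0 + p))).sum) (0 + p)]
    have hsegs : pvSegs array 0 (p :: ps) = pvSeg array 0 (0 + p) :: pvSegs array (0 + p) ps := rfl
    rw [hsegs, pvSeg, PySem.List.max?_id_cons]
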